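-- pv_equiv track=rewrite | github.com/h4zzkR/alpha | apps/main/views.py | parse_messages
-- ===== SOURCE A (Python) =====
-- def parse_messages(st):
--     msgs = {}
--     for k in st.keys():
--         if k != 'inactive':
--             if k == 'invalid_login':
--                 msgs.update({'error': 'Неправильный логин/пароль'})
--             else:
--                 msgs.update({'error': st[k]})
--     return msgs
-- ===== SOURCE B (Python) =====
-- def parse_messages(st):
--     for k in reversed(list(st.keys())):
--         if k != 'inactive':
--             if k == 'invalid_login':
--                 return {'error': 'Неправильный логин/пароль'}
--             return {'error': st[k]}
--     return {}
-- ===== Notes on version B (the rewrite author's own statement) =====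
-- stated objective: faster
-- what changed: Scans the keys in reverse and returns immediately at the first non-'inactive' key (early exit), instead of A's full forward pass that overwrites the dict on every non-'inactive' key; last-write-wins becomes first-match-in-reverse.
import Mathlib
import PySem

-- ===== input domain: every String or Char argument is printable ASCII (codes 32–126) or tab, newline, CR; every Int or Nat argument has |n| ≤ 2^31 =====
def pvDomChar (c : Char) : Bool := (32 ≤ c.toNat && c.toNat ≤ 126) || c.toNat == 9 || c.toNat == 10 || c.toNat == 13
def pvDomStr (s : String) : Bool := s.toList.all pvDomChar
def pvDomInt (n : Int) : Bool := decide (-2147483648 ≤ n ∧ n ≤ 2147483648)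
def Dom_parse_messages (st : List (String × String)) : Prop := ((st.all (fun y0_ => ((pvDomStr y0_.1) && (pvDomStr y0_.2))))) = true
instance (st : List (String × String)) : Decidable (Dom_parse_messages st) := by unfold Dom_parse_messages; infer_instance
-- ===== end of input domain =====

-- B scans the keys in reverse and returns at the first non-'inactive' key (early exit),
-- instead of A's full forward pass that overwrites the dict every iteration; alternative decomposition.

-- ===== PORT A =====
-- msgs = {}; for k in st.keys(): if k != 'inactive': msgs.update({'error': …}); return msgs
def parse_messages (st : List (String × String)) : List (String × String) :=
  ((PySem.Dict.mk st).keys.foldl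
    (fun msgs k =>
      if k ≠ "inactive" then
        if k = "invalid_login" then
          msgs.insert "error" "Неправильный логин/пароль"
        else
          msgs.insert "error" ((PySem.Dict.mk st).getD k "")
      else msgs)
    PySem.Dict.empty).items

-- ===== PORT B =====
-- for k in reversed(list(st.keys())): if k != 'inactive': return {…}; return {}
def pmRevScan (st : List (String × String)) : List String → List (String × String)
  | [] => []
  | k :: t =>
    if k ≠ "inactive" then
      if k = "invalid_login" then [("error", "Неправильный логин/пароль")]
      else [("error", (PySem.Dict.mk st).getD k "")]
    else pmRevScan st t

def parse_messages_alt (st : List (String × String)) : List (String × String) :=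
  pmRevScan st ((PySem.Dict.mk st).keys.reverse)

-- ===== PRECONDITION & SPEC =====
def Spec_parse_messages (st : List (String × String)) (out : List (String × String)) : Prop := out = parse_messages_alt st
instance (st : List (String × String)) (out : List (String × String)) : Decidable (Spec_parse_messages st out) := by unfold Spec_parse_messages; infer_instance

-- ===== CLAIM (what is proved, stated in full; the proofs are below) =====
def Claim_equal_parse_messages : Prop := ∀ (st : List (String × String)), Dom_parse_messages st → Spec_parse_messages st (parse_messages st)

-- ===== LEMMAS AND PROOFS =====

-- A's loop state is either empty or a one-entry dict at "error"; its final value is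
-- determined by the last non-'inactive' key of the remaining keys.
theorem parse_messages_loop (m : String) (f : String → String) (l : List String)
    (d : PySem.Dict String String)
    (hd : d = PySem.Dict.empty ∨ ∃ x, d = PySem.Dict.mk [("error", x)]) :
    (l.foldl
      (fun msgs k =>
        if k ≠ "inactive" then
          if k = "invalid_login" then msgs.insert "error" m
          else msgs.insert "error" (f k)
        else msgs) d) =
    (match (l.filter (fun k => k ≠ "inactive")).getLast? with
     | none => d
     | some k => PySem.Dict.mk [("error", if k = "invalid_login" then m else f k)]) := by
  induction l generalizing d with
  | nil => simp
  | cons k t ih =>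
    by_cases hk : k = "inactive"
    · subst hk
      simp only [List.foldl_cons, List.filter_cons]
      simpa using ih d hd
    · have hins : ∀ v : String, d.insert "error" v = PySem.Dict.mk [("error", v)] := by
        intro v
        rcases hd with h | ⟨x, h⟩ <;> subst h <;> rfl
      have hstep : (if k ≠ "inactive" then
          if k = "invalid_login" then d.insert "error" m
          else d.insert "error" (f k)
        else d) = PySem.Dict.mk [("error", if k = "invalid_login" then m else f k)] := by
        rw [if_pos (by simp [hk])]
        by_cases hkl : k = "invalid_login" <;> simp [hkl, hins]
      simp only [List.foldl_cons, List.filter_cons]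
      rw [hstep, ih _ (Or.inr ⟨_, rfl⟩)]
      have hd1 : decide ¬k = "inactive" = true := by simp [hk]
      rw [if_pos hd1]
      rcases h : (t.filter (fun k => k ≠ "inactive")).getLast? with _ | k' <;>
        simp only [List.getLast?_cons, h, Option.getD_some, Option.getD_none]

-- B's reverse scan is the head of the filtered reversed list.
theorem pmRevScan_eq (st : List (String × String)) (l : List String) :
    pmRevScan st l =
    (match (l.filter (fun k => k ≠ "inactive")).head? with
     | none => []
     | some k => [("error", if k = "invalid_login" then "Неправильный логин/пароль"
                            else (PySem.Dict.mk st).getD k "")]) := by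
  induction l with
  | nil => simp [pmRevScan]
  | cons k t ih =>
    by_cases hk : k = "inactive"
    · subst hk; simpa [pmRevScan] using ih
    · by_cases hkl : k = "invalid_login" <;> simp [pmRevScan, hk, hkl]

-- ===== VERDICT (by name: the statement is the Claim_ definition above) =====
theorem parse_messages_spec : Claim_equal_parse_messages := by
  intro st _
  unfold Spec_parse_messages parse_messages parse_messages_alt
  rw [parse_messages_loop "Неправильный логин/пароль"
        (fun k => (PySem.Dict.mk st).getD k "")
        ((PySem.Dict.mk st).keys) PySem.Dict.empty (Or.inl rfl),
      pmRevScan_eq]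
  rw [List.filter_reverse, List.head?_reverse]
  rcases h : (((PySem.Dict.mk st).keys).filter (fun k => k ≠ "inactive")).getLast? with _ | k <;>
    simp only [h] <;> rfl
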